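-- pv_equiv track=rewrite | github.com/darianrosebrook/kokoro-onnx-raycast-api | scripts/run_mutation_tests.py | calculate_operator_stats
-- ===== SOURCE A (Python) =====
-- def calculate_operator_stats(mutations):
--     """Calculate statistics by mutation operator type."""
--     stats = {}
--     for mutation in mutations:
--         op_type = mutation.get("type", "unknown")
--         if op_type not in stats:
--             stats[op_type] = {"total": 0, "killed": 0, "survived": 0}
--
--         stats[op_type]["total"] += 1
--         if mutation.get("killed"):
--             stats[op_type]["killed"] += 1
--         else:
--             stats[op_type]["survived"] += 1
--
--     return stats
-- ===== SOURCE B (Python) =====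
-- def calculate_operator_stats(mutations):
--     """Calculate statistics by mutation operator type (bucket, then aggregate)."""
--     buckets = {}
--     for mutation in mutations:
--         buckets.setdefault(mutation.get("type", "unknown"), []).append(mutation)
--     result = {}
--     for op_type, group in buckets.items():
--         total = len(group)
--         killed = sum(1 for m in group if m.get("killed"))
--         result[op_type] = {"total": total, "killed": killed, "survived": total - killed}
--     return result
-- ===== Notes on version B (the rewrite author's own statement) =====
-- stated objective: alternative
-- what changed: A keeps three running counters per type updated incrementally inside one loop; B first indexes the mutations into per-type buckets (first-occurrence order) and then aggregates each bucket in a second pass (total = len, killed = count, survived = total - killed).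
import Mathlib
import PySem

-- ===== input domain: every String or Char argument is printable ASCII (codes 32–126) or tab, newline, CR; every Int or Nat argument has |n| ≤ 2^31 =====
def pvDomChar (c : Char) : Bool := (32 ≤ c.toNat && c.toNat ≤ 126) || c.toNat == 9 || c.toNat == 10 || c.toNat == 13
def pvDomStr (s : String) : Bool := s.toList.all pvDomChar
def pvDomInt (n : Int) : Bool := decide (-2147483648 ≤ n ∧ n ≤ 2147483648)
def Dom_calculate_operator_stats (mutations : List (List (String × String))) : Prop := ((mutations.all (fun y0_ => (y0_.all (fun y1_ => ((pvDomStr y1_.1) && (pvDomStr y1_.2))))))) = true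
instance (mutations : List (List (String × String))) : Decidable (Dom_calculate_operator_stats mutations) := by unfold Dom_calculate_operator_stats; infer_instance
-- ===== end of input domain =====

-- B replaces A's incremental per-type running counters by an index-then-aggregate shape
-- (one pass building buckets keyed by type, then one pass aggregating each bucket); objective: alternative.


-- shared helpers (Python expressions used by both sources):
-- mutation.get("type", "unknown")
def pvType (m : List (String × String)) : String :=
  (PySem.Dict.mk m).getD "type" "unknown"

-- bool(mutation.get("killed")): absent key → falsy; a string is truthy iff non-empty
def pvGetKilled (m : List (String × String)) : Bool :=
  match (PySem.Dict.mk m).get? "killed" with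
  | some s => s != ""
  | none => false

-- ===== PORT A =====
-- the body of A's single loop
def pvStepA (stats : PySem.Dict String (PySem.Dict String Int)) (mutation : List (String × String)) :
    PySem.Dict String (PySem.Dict String Int) :=
  let op_type := pvType mutation
  let stats :=
    if stats.contains op_type = false then
      stats.insert op_type (PySem.Dict.ofList [("total", (0 : Int)), ("killed", 0), ("survived", 0)])
    else stats
  -- stats[op_type]["total"] += 1 ; then the killed/survived increment (in-place update of the inner dict)
  let inner := stats.getD op_type (PySem.Dict.mk [])
  let inner := inner.insert "total" (inner.getD "total" 0 + 1)
  let inner :=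
    if pvGetKilled mutation then inner.insert "killed" (inner.getD "killed" 0 + 1)
    else inner.insert "survived" (inner.getD "survived" 0 + 1)
  stats.insert op_type inner

def calculate_operator_stats (mutations : List (List (String × String))) :
    List (String × List (String × Int)) :=
  (mutations.foldl pvStepA (PySem.Dict.mk [])).items.map (fun p => (p.1, p.2.items))

-- ===== PORT B =====
-- result[op_type] = {"total": total, "killed": killed, "survived": total - killed}
def pvInnerStats (group : List (List (String × String))) : PySem.Dict String Int :=
  let total : Int := group.length
  let killed : Int := (group.countP (fun m => pvGetKilled m) : Nat)
  PySem.Dict.ofList [("total", total), ("killed", killed), ("survived", total - killed)]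

-- buckets.setdefault(mutation.get("type", "unknown"), []).append(mutation)
def pvStepB (buckets : PySem.Dict String (List (List (String × String))))
    (mutation : List (String × String)) : PySem.Dict String (List (List (String × String))) :=
  buckets.modify (pvType mutation) [] (fun g => g ++ [mutation])

def calculate_operator_stats_alt (mutations : List (List (String × String))) :
    List (String × List (String × Int)) :=
  ((mutations.foldl pvStepB (PySem.Dict.mk [])).items.foldl
      (fun r p => r.insert p.1 (pvInnerStats p.2)) (PySem.Dict.mk [])).items.map
    (fun p => (p.1, p.2.items))

-- ===== PRECONDITION & SPEC =====
def Spec_calculate_operator_stats (mutations : List (List (String × String))) (out : List (String × List (String × Int))) : Prop := out = calculate_operator_stats_alt mutations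
instance (mutations : List (List (String × String))) (out : List (String × List (String × Int))) : Decidable (Spec_calculate_operator_stats mutations out) := by unfold Spec_calculate_operator_stats; infer_instance

-- ===== CLAIM (what is proved, stated in full; the proofs are below) =====
def Claim_equal_calculate_operator_stats : Prop := ∀ (mutations : List (List (String × String))), Dom_calculate_operator_stats mutations → Spec_calculate_operator_stats mutations (calculate_operator_stats mutations)

-- ===== LEMMAS AND PROOFS =====

-- the canonical value both programs compute: for each type (first-occurrence order) the stats of its group
def pvCanon (ms : List (List (String × String))) : List (String × List (String × Int)) :=
  (PySem.Set.ofList (ms.map pvType)).map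
    (fun k => (k, (pvInnerStats (ms.filter (fun m' => pvType m' == k))).items))

-- A's two increments on the stats dict of g produce the stats dict of g ++ [m]
lemma pvInner_step (g : List (List (String × String))) (m : List (String × String)) :
    (let inner := (pvInnerStats g).insert "total" ((pvInnerStats g).getD "total" 0 + 1)
     if pvGetKilled m then inner.insert "killed" (inner.getD "killed" 0 + 1)
     else inner.insert "survived" (inner.getD "survived" 0 + 1)) = pvInnerStats (g ++ [m]) := by
  have g1 : ∀ a b c : Int, (PySem.Dict.ofList
      [("total", a), ("killed", b), ("survived", c)]).getD "total" 0 = a := fun _ _ _ => rfl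
  have g2 : ∀ a b c : Int, (PySem.Dict.ofList
      [("total", a), ("killed", b), ("survived", c)]).getD "killed" 0 = b := fun _ _ _ => rfl
  have g3 : ∀ a b c : Int, (PySem.Dict.ofList
      [("total", a), ("killed", b), ("survived", c)]).getD "survived" 0 = c := fun _ _ _ => rfl
  have e1 : ∀ a b c v : Int, (PySem.Dict.ofList
      [("total", a), ("killed", b), ("survived", c)]).insert "total" v =
      PySem.Dict.ofList [("total", v), ("killed", b), ("survived", c)] := fun _ _ _ _ => rfl
  have e2 : ∀ a b c v : Int, (PySem.Dict.ofList
      [("total", a), ("killed", b), ("survived", c)]).insert "killed" v =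
      PySem.Dict.ofList [("total", a), ("killed", v), ("survived", c)] := fun _ _ _ _ => rfl
  have e3 : ∀ a b c v : Int, (PySem.Dict.ofList
      [("total", a), ("killed", b), ("survived", c)]).insert "survived" v =
      PySem.Dict.ofList [("total", a), ("killed", b), ("survived", v)] := fun _ _ _ _ => rfl
  cases hb : pvGetKilled m <;>
    · simp only [pvInnerStats, Bool.false_eq_true, if_false, if_true, g1, g2, g3, e1, e2, e3]
      congr 1
      simp [List.countP_append, hb]
      try push_cast
      try omega

-- A's loop body when the type is already a key holding the stats of group g
lemma pvStepA_old (S : PySem.Dict String (PySem.Dict String Int)) (m : List (String × String))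
    (g : List (List (String × String)))
    (hcont : S.contains (pvType m) = true)
    (hget : S.getD (pvType m) (PySem.Dict.mk []) = pvInnerStats g) :
    pvStepA S m = S.insert (pvType m) (pvInnerStats (g ++ [m])) := by
  unfold pvStepA
  simp only [hcont, Bool.true_eq_false, if_false, hget]
  exact congrArg _ (pvInner_step g m)

-- A's loop body when the type is a fresh key
lemma pvStepA_new (S : PySem.Dict String (PySem.Dict String Int)) (m : List (String × String))
    (hcont : S.contains (pvType m) = false) :
    pvStepA S m = S.insert (pvType m) (pvInnerStats [m]) := by
  unfold pvStepA
  simp only [hcont, if_true]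
  rw [PySem.Dict.getD_insert_self]
  have h0 : PySem.Dict.ofList [("total", (0 : Int)), ("killed", 0), ("survived", 0)] =
      pvInnerStats [] := rfl
  rw [h0, pvInner_step [] m]
  simp [PySem.Dict.insert_insert_self]

-- invariant of A's fold: keys are the distinct types in first-occurrence order,
-- and each key holds the stats of its group
lemma pvStatsA_inv (ms : List (List (String × String))) :
    (ms.foldl pvStepA (PySem.Dict.mk [])).keys = PySem.Set.ofList (ms.map pvType) ∧
    ∀ k : String, (ms.foldl pvStepA (PySem.Dict.mk [])).get? k =
      if k ∈ ms.map pvType then some (pvInnerStats (ms.filter (fun m' => pvType m' == k)))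
      else none := by
  induction ms using List.reverseRecOn with
  | nil => exact ⟨rfl, fun k => by simp; rfl⟩
  | append_singleton ms m ih =>
    obtain ⟨hk, hg⟩ := ih
    have hcont : (ms.foldl pvStepA (PySem.Dict.mk [])).contains (pvType m)
        = decide (pvType m ∈ ms.map pvType) := by
      rw [PySem.Dict.contains_eq_decide_mem_keys, hk]
      simp [PySem.Set.mem_ofList]
    have hmaps : List.map pvType (ms ++ [m]) = List.map pvType ms ++ [pvType m] := by simp
    rw [List.foldl_append, List.foldl_cons, List.foldl_nil]
    by_cases hmem : pvType m ∈ ms.map pvType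
    · have hget : (ms.foldl pvStepA (PySem.Dict.mk [])).getD (pvType m) (PySem.Dict.mk []) =
          pvInnerStats (ms.filter (fun m' => pvType m' == pvType m)) := by
        refine PySem.Dict.getD_of_get?_eq_some _ _ ?_
        rw [hg (pvType m), if_pos hmem]
      rw [pvStepA_old _ m _ (by rw [hcont]; simp [hmem]) hget]
      constructor
      · rw [PySem.Dict.keys_insert_of_contains _ _ (by rw [hcont]; simp [hmem]), hk, hmaps,
          PySem.Set.ofList_append_singleton]
        exact (PySem.Set.add_of_mem (by rw [PySem.Set.mem_ofList]; exact hmem)).symm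
      · intro k
        rw [PySem.Dict.get?_insert]
        by_cases hke : k = pvType m
        · subst hke
          rw [if_pos rfl, if_pos (by simp), List.filter_append]
          simp
        · have hne : (pvType m == k) = false := by
            simpa using fun h => hke h.symm
          have hmem2 : k ∈ List.map pvType (ms ++ [m]) ↔ k ∈ List.map pvType ms := by
            simp [hke]
          have hfil : List.filter (fun m' => pvType m' == k) (ms ++ [m]) =
              List.filter (fun m' => pvType m' == k) ms := by
            simp [List.filter_append, hne]
          rw [if_neg hke, hg k, hfil]
          by_cases h2 : k ∈ List.map pvType ms
          · rw [if_pos h2, if_pos (hmem2.mpr h2)]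
          · rw [if_neg h2, if_neg (fun hc => h2 (hmem2.mp hc))]
    · rw [pvStepA_new _ m (by rw [hcont]; simp [hmem])]
      constructor
      · rw [PySem.Dict.keys_insert_of_not_contains _ _ (by rw [hcont]; simp [hmem]), hk, hmaps,
          PySem.Set.ofList_append_singleton]
        exact (PySem.Set.add_of_not_mem (by rw [PySem.Set.mem_ofList]; exact hmem)).symm
      · intro k
        rw [PySem.Dict.get?_insert]
        by_cases hke : k = pvType m
        · subst hke
          rw [if_pos rfl, if_pos (by simp), List.filter_append]
          have hnil : ms.filter (fun m' => pvType m' == pvType m) = [] := by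
            rw [List.filter_eq_nil_iff]
            intro a ha hbeq
            exact hmem (List.mem_map.mpr ⟨a, ha, by simpa using hbeq⟩)
          simp [hnil]
        · have hne : (pvType m == k) = false := by
            simpa using fun h => hke h.symm
          have hmem2 : k ∈ List.map pvType (ms ++ [m]) ↔ k ∈ List.map pvType ms := by
            simp [hke]
          have hfil : List.filter (fun m' => pvType m' == k) (ms ++ [m]) =
              List.filter (fun m' => pvType m' == k) ms := by
            simp [List.filter_append, hne]
          rw [if_neg hke, hg k, hfil]
          by_cases h2 : k ∈ List.map pvType ms
          · rw [if_pos h2, if_pos (hmem2.mpr h2)]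
          · rw [if_neg h2, if_neg (fun hc => h2 (hmem2.mp hc))]

lemma pvA_eq_canon (ms : List (List (String × String))) :
    calculate_operator_stats ms = pvCanon ms := by
  obtain ⟨hk, hg⟩ := pvStatsA_inv ms
  have hnd : (ms.foldl pvStepA (PySem.Dict.mk [])).keys.Nodup := by
    rw [hk]; exact PySem.Set.nodup_ofList _
  unfold calculate_operator_stats pvCanon
  rw [PySem.Dict.items_eq_map_keys _ hnd (PySem.Dict.mk []), hk, List.map_map]
  refine List.map_congr_left ?_
  intro k hkmem
  have hmem : k ∈ ms.map pvType := (PySem.Set.mem_ofList _ _).1 hkmem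
  have h := hg k
  rw [if_pos hmem] at h
  simp [PySem.Dict.getD_of_get?_eq_some _ _ h]

lemma pvB_eq_canon (ms : List (List (String × String))) :
    calculate_operator_stats_alt ms = pvCanon ms := by
  unfold calculate_operator_stats_alt
  have hfold : ms.foldl pvStepB (PySem.Dict.mk []) =
      (ms.map (fun m => (pvType m, m))).foldl
        (fun d p => d.modify p.1 [] (fun g => g ++ [p.2])) (PySem.Dict.mk []) := by
    rw [List.foldl_map]
    rfl
  have hkeys : (ms.foldl pvStepB (PySem.Dict.mk [])).keys = PySem.Set.ofList (ms.map pvType) := by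
    have := PySem.Dict.keys_foldl_modify_key ms pvType []
      (fun _ m => fun g => g ++ [m]) (PySem.Dict.mk [])
    simpa [pvStepB, PySem.Set.update_nil_left] using this
  have hnd : (ms.foldl pvStepB (PySem.Dict.mk [])).keys.Nodup := by
    rw [hkeys]; exact PySem.Set.nodup_ofList _
  have hget : ∀ k : String, (ms.foldl pvStepB (PySem.Dict.mk [])).getD k [] =
      ms.filter (fun m' => pvType m' == k) := by
    intro k
    have h0 : (PySem.Dict.mk ([] : List (String × List (List (String × String))))).getD k [] =
        [] := rfl
    rw [hfold, PySem.Dict.getD_foldl_modify_append, h0]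
    simp [List.filter_map, Function.comp_def]
  have hres : ((ms.foldl pvStepB (PySem.Dict.mk [])).items.foldl
      (fun r p => r.insert p.1 (pvInnerStats p.2)) (PySem.Dict.mk [])).items =
      (ms.foldl pvStepB (PySem.Dict.mk [])).items.map (fun p => (p.1, pvInnerStats p.2)) := by
    have := PySem.Dict.items_foldl_insert_fresh
      ((ms.foldl pvStepB (PySem.Dict.mk [])).items) Prod.fst (fun p => pvInnerStats p.2)
      (PySem.Dict.mk []) (fun a _ => rfl) (by simpa [PySem.Dict.keys] using hnd)
    simpa using this
  rw [hres, PySem.Dict.items_eq_map_keys _ hnd [], hkeys, List.map_map, List.map_map]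
  unfold pvCanon
  refine List.map_congr_left ?_
  intro k _
  simp [hget k]

-- ===== VERDICT (by name: the statement is the Claim_ definition above) =====
theorem calculate_operator_stats_spec : Claim_equal_calculate_operator_stats := by
  intro ms _
  unfold Spec_calculate_operator_stats
  rw [pvA_eq_canon, pvB_eq_canon]
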